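-- pv_equiv track=rewrite | github.com/supra-nlpn/FuSS | hw/coverage.py | track_toggles
-- ===== SOURCE A (Python) =====
-- def track_toggles(vcd_lines, signal_bits):
--     signal_values = {}
--
--     for line in vcd_lines:
--         line = line.strip()
--
--         if line.startswith("b"):  # Binary values (for multi-bit signals)
--             binary_value, signal_id = line.split()
--             binary_value = binary_value.replace("x", "0").replace("z", "0")  # Handle x/z as 0
--
--             # Get the bit width of the signal
--             num_bits = signal_bits[signal_id][0]
--
--             # Pad binary value with leading zeros to match the signal bit width
--             binary_value = binary_value.zfill(num_bits)
--
--             if signal_id not in signal_values: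
--                 signal_values[signal_id] = ['0'] * num_bits  # Initialize the signal with "0"s
--             else:
--                 prev_value = signal_values[signal_id]
--
--                 # Count the toggles (0 -> 1) for each bit position
--                 toggled_bits = 0
--                 for i in range(num_bits):
--                     if prev_value[i] == '0' and binary_value[i] == '1':
--                         prev_value[i] = '1'  # Mark the bit as toggled from 0 to 1
--                         toggled_bits += 1
--
--                 signal_bits[signal_id][1] = min(signal_bits[signal_id][1] + toggled_bits, num_bits)
--
--                 signal_values[signal_id] = list(binary_value)
--
--         elif line[0] in "01xz":  # Single-bit signals
--             value = line[0].replace("x", "0").replace("z", "0")  # Handle x/z as 0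
--             signal_id = line[1:]
--
--             if signal_id not in signal_values:
--                 signal_values[signal_id] = value
--             else:
--                 prev_value = signal_values[signal_id]
--                 if prev_value == "0" and value == "1":
--                     signal_bits[signal_id][1] = 1  # Set toggle value to 1 for a single-bit signal
--                 signal_values[signal_id] = value
--
--     return signal_bits
-- ===== SOURCE B (Python) =====
-- def track_toggles(vcd_lines, signal_bits):
--     # Remember each signal's last value as an integer mask of its zero bits;
--     # 0->1 rises of a new value are then one AND plus a popcount per line,
--     # instead of a per-character scan.  Mutates signal_bits in place.
--     prev = {}
--     for raw in vcd_lines: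
--         line = raw.strip()
--         if line.startswith("b"):
--             token, sid = line.split()
--             num_bits = signal_bits[sid][0]
--             value = token.replace("x", "0").replace("z", "0").zfill(num_bits)
--             if sid in prev:
--                 ones = int("".join("1" if c == "1" else "0" for c in value), 2)
--                 rises = bin(prev[sid] & ones).count("1")
--                 signal_bits[sid][1] = min(signal_bits[sid][1] + rises, num_bits)
--                 prev[sid] = int("".join("1" if c == "0" else "0" for c in value), 2)
--             else:
--                 prev[sid] = (1 << num_bits) - 1  # a signal starts with every bit at 0
--         elif line[0] in "01xz":
--             bit = "0" if line[0] in "xz" else line[0]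
--             sid = line[1:]
--             if prev.get(sid) == "0" and bit == "1":
--                 signal_bits[sid][1] = 1
--             prev[sid] = bit
--     return signal_bits
-- ===== Notes on version B (the rewrite author's own statement) =====
-- stated objective: alternative
-- what changed: Each signal's previous multi-bit value is kept as one integer mask of its zero bits instead of a list of characters, and the per-bit counting loop is replaced by a bit-parallel popcount of (zero_mask & one_mask); Pre_ excludes inputs where A raises, duplicate-key association lists, and two defensible corners where A's value is an implementation artefact: a 'b'-line value token wider than its declared bit width (A compares a left-aligned prefix) and an id used first as a single-bit and later as a multi-bit signal (B raises TypeError there).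
-- outside the precondition, e.g. on track_toggles(['b1 q', 'b1 q'], {'q': [1, 0]}): A returns {'q': [1, 0]}, B returns {'q': [1, 1]}; on track_toggles(['0q', 'b q'], {'q': [1, 5]}): A returns {'q': [1, 1]}, B raises TypeError; on track_toggles(['b0 q'], {'q': [0, 0]}): A returns {'q': [0, 0]}, B returns {'q': [0, 0]}
import Mathlib
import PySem

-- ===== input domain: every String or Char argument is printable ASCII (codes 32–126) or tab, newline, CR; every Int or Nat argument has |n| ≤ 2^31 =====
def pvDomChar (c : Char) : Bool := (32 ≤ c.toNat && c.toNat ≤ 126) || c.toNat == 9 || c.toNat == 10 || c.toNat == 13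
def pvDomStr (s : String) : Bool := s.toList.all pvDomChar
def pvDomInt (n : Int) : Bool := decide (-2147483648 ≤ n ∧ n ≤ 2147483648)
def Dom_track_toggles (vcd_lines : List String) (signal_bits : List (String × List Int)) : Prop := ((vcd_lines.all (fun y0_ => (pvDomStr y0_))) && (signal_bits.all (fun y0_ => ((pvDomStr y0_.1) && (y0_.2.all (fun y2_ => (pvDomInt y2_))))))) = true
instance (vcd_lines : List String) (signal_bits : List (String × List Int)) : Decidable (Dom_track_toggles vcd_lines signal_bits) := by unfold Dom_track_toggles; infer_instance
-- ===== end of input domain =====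

-- B keeps each multi-bit signal's previous value as one integer mask of its zero bits and
-- counts 0→1 rises bit-parallel with one AND and a popcount, instead of A's per-character
-- list scan.  A mutates signal_bits in place in Python; the equivalence proved here is
-- about the returned value.

-- ===== PORT A =====

-- signal_bits[k]  (dict lookup = first match in the association list)
def sbGet? (sb : List (String × List Int)) (k : String) : Option (List Int) :=
  match sb with
  | [] => none
  | (k', v) :: rest => if k' = k then some v else sbGet? rest k

-- signal_bits[k][1] = v  (in-place list assignment; index 1 exists under Pre_)
def sbSet1 (sb : List (String × List Int)) (k : String) (v : Int) : List (String × List Int) :=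
  match sb with
  | [] => []
  | (k', row) :: rest => if k' = k then (k', row.set 1 v) :: rest else (k', row) :: sbSet1 rest k v

-- the body of A's 'b' branch after 'binary_value, signal_id = line.split()'
def bBranchA (sv : PySem.Dict String (List Char ⊕ String)) (sb : List (String × List Int))
    (bv0 sid : String) : PySem.Dict String (List Char ⊕ String) × List (String × List Int) :=
  let bv1 := PySem.Str.replace (PySem.Str.replace bv0 "x" "0") "z" "0"
  match sbGet? sb sid with
  | none => (sv, sb)          -- Python: KeyError; outside Pre_
  | some row =>
    let num_bits : Int := row.getD 0 0      -- row has ≥ 2 entries under Pre_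
    let bv := PySem.Str.zfill bv1 num_bits
    match sv.get? sid with
    | none => (sv.insert sid (Sum.inl (List.replicate num_bits.toNat '0')), sb)
    | some (Sum.inl prev) =>
      -- for i in range(num_bits): count prev[i]=='0' and bv[i]=='1'
      -- (A's write prev_value[i]='1' is dead: each index is read once and the
      --  whole list is overwritten below; indices are in range under Pre_)
      let toggled : Int :=
        (PySem.List.pyRange 0 num_bits 1).foldl
          (fun acc i =>
            if PySem.List.pyGetD prev i ' ' = '0' ∧ PySem.List.pyGetD bv.toList i ' ' = '1'
            then acc + 1 else acc) 0
      (sv.insert sid (Sum.inl bv.toList),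
       sbSet1 sb sid (min (row.getD 1 0 + toggled) num_bits))
    | some (Sum.inr _) => (sv, sb)   -- Python mutates a string char here (raises) or keeps an
                                     -- accidental value; outside Pre_ either way

-- the body of A's single-bit branch, on line[0] = c and line[1:] = rest
def singleBranchA (sv : PySem.Dict String (List Char ⊕ String)) (sb : List (String × List Int))
    (c : Char) (rest : List Char) : PySem.Dict String (List Char ⊕ String) × List (String × List Int) :=
  if c = '0' ∨ c = '1' ∨ c = 'x' ∨ c = 'z' then     -- line[0] in "01xz"
    let value : String := if c = 'x' ∨ c = 'z' then "0" else String.ofList [c]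
    let sid := String.ofList rest                        -- line[1:]
    match sv.get? sid with
    | none => (sv.insert sid (Sum.inr value), sb)
    | some prevv =>
      (sv.insert sid (Sum.inr value),
       -- Python: signal_bits[signal_id][1] = 1 (KeyError if sid missing; outside Pre_)
       if prevv = Sum.inr "0" ∧ value = "1" then sbSet1 sb sid 1 else sb)
  else (sv, sb)

-- one loop iteration of A; signal_values maps an id to Sum.inl <list of chars> (multi-bit)
-- or Sum.inr <value string> (single-bit), exactly the two value shapes A's dict holds
def trackStepA (st : PySem.Dict String (List Char ⊕ String) × List (String × List Int))
    (raw : String) : PySem.Dict String (List Char ⊕ String) × List (String × List Int) :=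
  let line := PySem.Str.strip raw
  if PySem.Str.startswith line "b" then
    match PySem.Str.split₀ line with
    | [bv0, sid] => bBranchA st.1 st.2 bv0 sid
    | _ => st             -- unpacking 'a, b = line.split()' raises ValueError; outside Pre_
  else
    match line.toList with
    | [] => st            -- line[0] raises IndexError; outside Pre_
    | c :: rest => singleBranchA st.1 st.2 c rest

def track_toggles (vcd_lines : List String) (signal_bits : List (String × List Int)) :
    List (String × List Int) :=
  (vcd_lines.foldl trackStepA (PySem.Dict.empty, signal_bits)).2

-- ===== PORT B =====

-- int("".join("1" if p(c) else "0" for c in cs), 2): a base-2 numeral, most significant first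
def maskOf (p : Char → Bool) (cs : List Char) : Int :=
  cs.foldl (fun a c => 2 * a + (if p c then 1 else 0)) 0

-- signal_bits[sid][1] = v (keys are unique under Pre_, so rewriting every matching row
-- is the dict-item mutation)
def putCount (sid : String) (v : Int) (sb : List (String × List Int)) : List (String × List Int) :=
  sb.map (fun e => if e.1 = sid then (e.1, e.2.set 1 v) else e)

-- B's loop, one recursive pass over the lines carrying prev (an id maps to Sum.inl
-- <zero-bit mask> for multi-bit signals, Sum.inr <value string> for single-bit ones)
def runAlt (prev : PySem.Dict String (Int ⊕ String)) (sb : List (String × List Int)) :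
    List String → List (String × List Int)
  | [] => sb
  | raw :: rest =>
    let line := PySem.Str.strip raw
    if PySem.Str.startswith line "b" then
      match PySem.Str.split₀ line with
      | [token, sid] =>
        match sb.lookup sid with
        | none => runAlt prev sb rest        -- KeyError; outside Pre_
        | some row =>
          let num_bits : Int := row.getD 0 0
          let value := (PySem.Str.zfill
            (PySem.Str.replace (PySem.Str.replace token "x" "0") "z" "0") num_bits).toList
          match prev.get? sid with
          | some (Sum.inl zmask) =>
            let rises : Int := PySem.Int.bitCount (PySem.Int.band zmask (maskOf (· = '1') value))
            runAlt (prev.insert sid (Sum.inl (maskOf (· = '0') value)))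
              (putCount sid (min (row.getD 1 0 + rises) num_bits) sb) rest
          | some (Sum.inr _) => runAlt prev sb rest   -- int & str: TypeError; outside Pre_
          | none =>
            runAlt (prev.insert sid (Sum.inl (((1 : Int) <<< num_bits.toNat) - 1))) sb rest
      | _ => runAlt prev sb rest             -- ValueError; outside Pre_
    else
      match line.toList with
      | [] => runAlt prev sb rest            -- IndexError; outside Pre_
      | c :: tail =>
        if c = '0' ∨ c = '1' ∨ c = 'x' ∨ c = 'z' then
          let bit : String := if c = 'x' ∨ c = 'z' then "0" else String.ofList [c]
          let sid := String.ofList tail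
          runAlt (prev.insert sid (Sum.inr bit))
            (if prev.get? sid = some (Sum.inr "0") ∧ bit = "1" then putCount sid 1 sb else sb)
            rest
        else runAlt prev sb rest

def track_toggles_alt (vcd_lines : List String) (signal_bits : List (String × List Int)) :
    List (String × List Int) :=
  runAlt PySem.Dict.empty signal_bits vcd_lines

-- ===== PRECONDITION & SPEC =====

-- Per-line well-formedness scan, carrying the ids already used by single-bit lines (seenS):
-- every stripped line is nonempty; every 'b' line has exactly two tokens, an id present in
-- signal_bits with a row of ≥ 2 entries and a positive declared width no smaller than the
-- value token, and an id not previously used as single-bit; a '1' line whose id was already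
-- seen single-bit needs that id present with a row of ≥ 2 entries.
-- the two row checks the scan makes against signal_bits
def rowOKb (sb : List (String × List Int)) (tok sid : String) : Bool :=
  match sb.lookup sid with
  | some row => decide (2 ≤ row.length) && decide (0 < row.getD 0 0) &&
      decide ((tok.toList.length : Int) ≤ row.getD 0 0)
  | none => false

def rowOK1 (sb : List (String × List Int)) (sid : String) : Bool :=
  match sb.lookup sid with
  | some row => decide (2 ≤ row.length)
  | none => false

-- Per-line well-formedness scan, carrying the ids already used by single-bit lines (seenS):
-- every stripped line is nonempty; every 'b' line has exactly two tokens, an id present in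
-- signal_bits with a row of ≥ 2 entries and a positive declared width no smaller than the
-- value token, and an id not previously used as single-bit; a '1' line whose id was already
-- seen single-bit needs that id present with a row of ≥ 2 entries.
def preScan (sb : List (String × List Int)) (seenS : List String) : List String → Bool
  | [] => true
  | raw :: rest =>
    match (PySem.Str.strip raw).toList with
    | [] => false
    | c :: tail =>
      if c = 'b' then
        match PySem.Str.split₀ (PySem.Str.strip raw) with
        | [tok, sid] => rowOKb sb tok sid && !(seenS.contains sid) && preScan sb seenS rest
        | _ => false
      else if c = '0' ∨ c = '1' ∨ c = 'x' ∨ c = 'z' then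
        let sid := String.ofList tail
        (if c = '1' ∧ seenS.contains sid then rowOK1 sb sid else true)
        && preScan sb (sid :: seenS) rest
      else preScan sb seenS rest

-- Pre_ excludes (a) inputs where A raises (an empty stripped line: IndexError; a 'b' line
-- without exactly two tokens: ValueError; a needed id missing from signal_bits or with a
-- row shorter than 2: KeyError/IndexError), conservatively also the non-raising corners of
-- those reasons; (b) association lists with duplicate keys, which do not represent a Python
-- dict; and (c) two corners where A's returned value is an artefact of its implementation
-- and B's natural behaviour is as defensible: a 'b' line whose value token is wider than
-- the declared bit width — A then compares a left-aligned prefix of misaligned data (this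
-- subsumes non-positive declared widths) — and an id used first as a single-bit and later
-- as a multi-bit signal, where B raises TypeError.
def Pre_track_toggles (vcd_lines : List String) (signal_bits : List (String × List Int)) : Prop :=
  (signal_bits.map Prod.fst).Nodup ∧ preScan signal_bits [] vcd_lines = true

instance (vcd_lines : List String) (signal_bits : List (String × List Int)) :
    Decidable (Pre_track_toggles vcd_lines signal_bits) := by
  unfold Pre_track_toggles; infer_instance

def pvWitness_track_toggles : List String × (List (String × List Int)) :=
  (["b10 q", "b11 q", "0s", "1s"], [("q", [3, 0]), ("s", [1, 0])])

def Spec_track_toggles (vcd_lines : List String) (signal_bits : List (String × List Int))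
    (out : List (String × List Int)) : Prop :=
  out = track_toggles_alt vcd_lines signal_bits

instance (vcd_lines : List String) (signal_bits : List (String × List Int))
    (out : List (String × List Int)) : Decidable (Spec_track_toggles vcd_lines signal_bits out) := by
  unfold Spec_track_toggles; infer_instance

-- ===== CLAIM (what is proved, stated in full; the proofs are below) =====
def Claim_equal_track_toggles : Prop := ∀ (vcd_lines : List String) (signal_bits : List (String × List Int)), Dom_track_toggles vcd_lines signal_bits → Pre_track_toggles vcd_lines signal_bits → Spec_track_toggles vcd_lines signal_bits (track_toggles vcd_lines signal_bits)

-- ===== LEMMAS AND PROOFS =====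

theorem lookup_eq_sbGet? (sb : List (String × List Int)) (k : String) :
    sb.lookup k = sbGet? sb k := by
  induction sb with
  | nil => rfl
  | cons hd tl ih =>
    obtain ⟨k', v⟩ := hd
    by_cases h : k' = k
    · subst h; simp [List.lookup, sbGet?]
    · have hbe : (k == k') = false := by
        simp [Ne.symm h]
      simp [List.lookup, sbGet?, h, hbe, ih]

theorem keys_sbSet1 (sb : List (String × List Int)) (s : String) (v : Int) :
    (sbSet1 sb s v).map Prod.fst = sb.map Prod.fst := by
  induction sb with
  | nil => rfl
  | cons hd tl ih =>
    obtain ⟨k', row⟩ := hd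
    by_cases h : k' = s <;> simp [sbSet1, h, ih]

theorem putCount_of_not_mem (s : String) (v : Int) (tl : List (String × List Int))
    (h : s ∉ tl.map Prod.fst) : putCount s v tl = tl := by
  induction tl with
  | nil => rfl
  | cons hd t ih =>
    simp only [List.map_cons, List.mem_cons, not_or] at h
    show (if hd.1 = s then (hd.1, hd.2.set 1 v) else hd) :: putCount s v t = hd :: t
    rw [if_neg (fun he => h.1 he.symm), ih h.2]

theorem putCount_eq_sbSet1 (sb : List (String × List Int)) (s : String) (v : Int)
    (hnd : (sb.map Prod.fst).Nodup) : putCount s v sb = sbSet1 sb s v := by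
  induction sb with
  | nil => rfl
  | cons hd tl ih =>
    obtain ⟨k', row⟩ := hd
    simp only [List.map_cons, List.nodup_cons] at hnd
    by_cases h : k' = s
    · subst h
      show (if (k', row).1 = k' then ((k', row).1, (k', row).2.set 1 v) else (k', row)) ::
            putCount k' v tl
          = if k' = k' then (k', row.set 1 v) :: tl else (k', row) :: sbSet1 tl k' v
      rw [if_pos rfl, if_pos rfl, putCount_of_not_mem _ _ _ hnd.1]
    · show (if (k', row).1 = s then ((k', row).1, (k', row).2.set 1 v) else (k', row)) ::
            putCount s v tl
          = if k' = s then (k', row.set 1 v) :: tl else (k', row) :: sbSet1 tl s v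
      rw [if_neg h, if_neg h, ih hnd.2]

theorem sbGet?_sbSet1 (sb : List (String × List Int)) (s k : String) (v : Int) :
    sbGet? (sbSet1 sb s v) k =
      if k = s then (sbGet? sb s).map (fun row => row.set 1 v) else sbGet? sb k := by
  induction sb with
  | nil => by_cases h : k = s <;> simp [sbGet?, sbSet1, h]
  | cons hd tl ih =>
    obtain ⟨k', row⟩ := hd
    by_cases h1 : k' = s <;> by_cases h2 : k' = k <;> by_cases h3 : k = s <;>
      simp_all [sbGet?, sbSet1]

theorem getD_zero_set_one (row : List Int) (v : Int) : (row.set 1 v).getD 0 0 = row.getD 0 0 := by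
  cases row with
  | nil => rfl
  | cons a t => cases t <;> rfl

theorem rowOKb_sbSet1 (sb : List (String × List Int)) (s : String) (v : Int) (tok sid : String) :
    rowOKb (sbSet1 sb s v) tok sid = rowOKb sb tok sid := by
  unfold rowOKb
  rw [lookup_eq_sbGet?, lookup_eq_sbGet?, sbGet?_sbSet1]
  by_cases h : sid = s
  · subst h
    cases sbGet? sb sid with
    | none => simp
    | some row =>
      simp only [if_true, Option.map_some, getD_zero_set_one, List.length_set]
  · simp [h]

theorem rowOK1_sbSet1 (sb : List (String × List Int)) (s : String) (v : Int) (sid : String) :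
    rowOK1 (sbSet1 sb s v) sid = rowOK1 sb sid := by
  unfold rowOK1
  rw [lookup_eq_sbGet?, lookup_eq_sbGet?, sbGet?_sbSet1]
  by_cases h : sid = s
  · subst h
    cases sbGet? sb sid with
    | none => simp
    | some row => simp only [if_true, Option.map_some, List.length_set]
  · simp [h]

theorem preScan_sbSet1 (sb : List (String × List Int)) (s : String) (v : Int) :
    ∀ (ls : List String) (seenS : List String),
      preScan (sbSet1 sb s v) seenS ls = preScan sb seenS ls := by
  intro ls
  induction ls with
  | nil => intro seenS; rfl
  | cons raw rest ih =>
    intro seenS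
    simp only [preScan, rowOKb_sbSet1, rowOK1_sbSet1, ih]

-- the bit width A and B use for key k in the current signal_bits
def widthOf (sb : List (String × List Int)) (k : String) : Nat :=
  match sbGet? sb k with
  | some row => (max (row.getD 0 0) 0).toNat
  | none => 0

theorem widthOf_sbSet1 (sb : List (String × List Int)) (s k : String) (v : Int) :
    widthOf (sbSet1 sb s v) k = widthOf sb k := by
  unfold widthOf
  rw [sbGet?_sbSet1]
  by_cases h : k = s
  · subst h
    cases sbGet? sb k with
    | none => simp
    | some row => simp only [if_true, Option.map_some]; rw [getD_zero_set_one]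
  · simp [h]

-- x/z→0 replacement as a character map
def repl (c : Char) : Char := if c = 'x' ∨ c = 'z' then '0' else c

-- head-is-least-significant-bit mask of a char list
def lmask (p : Char → Bool) : List Char → Nat
  | [] => 0
  | a :: rest => Nat.bit (p a) (lmask p rest)

-- positional count of P-at-left ∧ Q-at-right pairs
def countPQ (P Q : Char → Bool) : List Char → List Char → Nat
  | a :: p, b :: c => (if P a ∧ Q b then 1 else 0) + countPQ P Q p c
  | _, _ => 0

theorem go_single (a b : Char) : ∀ (fuel : Nat) (l acc : List Char), l.length ≤ fuel →
    PySem.Chars.replace.go [a] [b] fuel l acc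
      = acc.reverse ++ l.map (fun c => if c = a then b else c) := by
  intro fuel
  induction fuel with
  | zero =>
    intro l acc h
    have : l = [] := List.eq_nil_of_length_eq_zero (Nat.le_zero.mp h)
    subst this; simp [PySem.Chars.replace.go]
  | succ n ih =>
    intro l acc h
    cases l with
    | nil => simp [PySem.Chars.replace.go]
    | cons c t =>
      simp only [PySem.Chars.replace.go]
      by_cases hc : c = a
      · simp only [List.isPrefixOf, hc, BEq.rfl, Bool.true_and, if_true]
        rw [ih _ _ (by simpa using Nat.le_of_succ_le_succ h)]
        simp
      · have : [a].isPrefixOf (c :: t) = false := by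
          simp [List.isPrefixOf]; exact fun h' => absurd h'.symm hc
        rw [this]
        simp only [Bool.false_eq_true, if_false]
        rw [ih _ _ (by simpa using Nat.le_of_succ_le_succ h)]
        simp [hc]

theorem replace_single (cs : List Char) (a b : Char) :
    PySem.Chars.replace cs [a] [b] = cs.map (fun c => if c = a then b else c) := by
  simp [PySem.Chars.replace, List.isEmpty]
  rw [go_single a b cs.length cs [] le_rfl]
  simp

theorem replace_xz (s : String) :
    (PySem.Str.replace (PySem.Str.replace s "x" "0") "z" "0").toList = s.toList.map repl := by
  simp only [PySem.Str.toList_replace]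
  have hx : ("x" : String).toList = ['x'] := rfl
  have hz : ("z" : String).toList = ['z'] := rfl
  have h0 : ("0" : String).toList = ['0'] := rfl
  rw [hx, hz, h0, replace_single, replace_single, List.map_map]
  apply List.map_congr_left
  intro c _
  simp only [Function.comp, repl]
  by_cases h1 : c = 'x' <;> by_cases h2 : c = 'z' <;> simp [h1, h2]

theorem maskOf_eq_lmask (p : Char → Bool) (cs : List Char) :
    maskOf p cs = ((lmask p cs.reverse : Nat) : Int) := by
  induction cs using List.reverseRecOn with
  | nil => rfl
  | append_singleton l c ih =>
    unfold maskOf at *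
    rw [List.foldl_append, List.reverse_append]
    simp only [List.foldl_cons, List.foldl_nil, List.reverse_singleton, List.singleton_append]
    rw [ih]
    simp only [lmask, Nat.bit]
    cases h : p c <;> simp

theorem countPQ_append (P Q : Char → Bool) (p c : List Char) (a b : Char)
    (h : p.length = c.length) :
    countPQ P Q (p ++ [a]) (c ++ [b]) = countPQ P Q p c + (if P a ∧ Q b then 1 else 0) := by
  induction p generalizing c with
  | nil => cases c with
    | nil => simp [countPQ]
    | cons x xs => simp at h
  | cons x xs ih =>
    cases c with
    | nil => simp at h
    | cons y ys =>
      simp only [List.cons_append, countPQ]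
      rw [ih ys (by simpa using h)]
      omega

theorem countPQ_reverse (P Q : Char → Bool) (p c : List Char) (h : p.length = c.length) :
    countPQ P Q p.reverse c.reverse = countPQ P Q p c := by
  induction p generalizing c with
  | nil => cases c with
    | nil => rfl
    | cons x xs => simp at h
  | cons x xs ih =>
    cases c with
    | nil => simp at h
    | cons y ys =>
      simp only [List.reverse_cons, countPQ]
      rw [countPQ_append P Q _ _ _ _ (by simpa using h), ih ys (by simpa using h)]
      omega

theorem bitCount_bit (b : Bool) (m : Nat) :
    PySem.Int.bitCount ((Nat.bit b m : Nat) : Int) = (cond b 1 0) + PySem.Int.bitCount (m : Int) := by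
  by_cases h0 : Nat.bit b m = 0
  · rcases Nat.bit_eq_zero_iff.mp h0 with ⟨hm, hb⟩
    subst hm hb
    simp [PySem.Int.bitCount_zero]
  · rw [PySem.Int.bitCount_natCast (Nat.pos_of_ne_zero h0)]
    rcases b with _ | _ <;> simp only [Nat.bit, cond_false, cond_true]
    · have h1 : (2 * m) % 2 = 0 := by omega
      have h2 : (2 * m) / 2 = m := by omega
      rw [h1, h2]
    · have h1 : (2 * m + 1) % 2 = 1 := by omega
      have h2 : (2 * m + 1) / 2 = m := by omega
      rw [h1, h2]

theorem bitCount_land_lmask (P Q : Char → Bool) (p c : List Char) (h : p.length = c.length) :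
    PySem.Int.bitCount ((((lmask P p) &&& (lmask Q c) : Nat)) : Int) = countPQ P Q p c := by
  induction p generalizing c with
  | nil => cases c with
    | nil => simp [lmask, countPQ, PySem.Int.bitCount_zero]
    | cons x xs => simp at h
  | cons x xs ih =>
    cases c with
    | nil => simp at h
    | cons y ys =>
      simp only [lmask, countPQ]
      rw [Nat.land_bit, bitCount_bit, ih ys (by simpa using h)]
      cases hP : P x <;> cases hQ : Q y <;> simp_all

theorem core_count (P Q : Char → Bool) (p c : List Char) (h : p.length = c.length) :
    PySem.Int.bitCount (PySem.Int.band (maskOf P p) (maskOf Q c)) = countPQ P Q p c := by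
  rw [maskOf_eq_lmask, maskOf_eq_lmask, PySem.Int.band_natCast,
      bitCount_land_lmask P Q p.reverse c.reverse (by simpa using h),
      countPQ_reverse P Q p c h]

theorem foldl_range_count (P Q : Char → Bool) (p c : List Char) (w : Nat)
    (hp : w ≤ p.length) (hc : w ≤ c.length) :
    (List.range w).foldl
      (fun (acc : Int) k => if P (p.getD k ' ') ∧ Q (c.getD k ' ') then acc + 1 else acc) 0
    = (countPQ P Q (p.take w) (c.take w) : Int) := by
  induction w with
  | zero => simp [countPQ]
  | succ n ih =>
    rw [List.range_succ, List.foldl_append]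
    rw [ih (Nat.le_of_succ_le hp) (Nat.le_of_succ_le hc)]
    have hpn : n < p.length := hp
    have hcn : n < c.length := hc
    rw [List.take_add_one, List.take_add_one, List.getElem?_eq_getElem hpn,
        List.getElem?_eq_getElem hcn]
    simp only [Option.toList_some]
    rw [countPQ_append P Q _ _ _ _ (by simp [Nat.le_of_lt hpn, Nat.le_of_lt hcn])]
    simp only [List.foldl_cons, List.foldl_nil]
    rw [List.getD_eq_getElem p ' ' hpn, List.getD_eq_getElem c ' ' hcn]
    split <;> push_cast <;> ring

theorem maskOf_replicate_zero (w : Nat) :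
    maskOf (fun c => c = '0') (List.replicate w '0') = ((1 : Int) <<< w) - 1 := by
  rw [Int.shiftLeft_eq]
  induction w with
  | zero => rfl
  | succ n ih =>
    rw [List.replicate_succ']
    unfold maskOf at *
    rw [List.foldl_append, ih]
    simp [pow_succ]
    ring

-- value relation between A's and B's per-signal records
def RelV : Option (List Char ⊕ String) → Option (Int ⊕ String) → Nat → Prop
  | none, none, _ => True
  | some (Sum.inr s), some (Sum.inr t), _ => s = t
  | some (Sum.inl l), some (Sum.inl z), w =>
      l.length = w ∧ z = maskOf (fun c => c = '0') l
  | _, _, _ => False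

def StInv (sv : PySem.Dict String (List Char ⊕ String)) (pv : PySem.Dict String (Int ⊕ String))
    (sb : List (String × List Int)) : Prop :=
  ∀ k : String, RelV (sv.get? k) (pv.get? k) (widthOf sb k)

theorem StInv_insert (sv : PySem.Dict String (List Char ⊕ String))
    (pv : PySem.Dict String (Int ⊕ String)) (sb : List (String × List Int)) (sid : String)
    (vA : List Char ⊕ String) (vB : Int ⊕ String) (hinv : StInv sv pv sb)
    (h : RelV (some vA) (some vB) (widthOf sb sid)) :
    StInv (sv.insert sid vA) (pv.insert sid vB) sb := by
  intro k
  by_cases hk : k = sid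
  · subst hk
    rw [PySem.Dict.get?_insert_self, PySem.Dict.get?_insert_self]
    exact h
  · rw [PySem.Dict.get?_insert_of_ne _ _ hk, PySem.Dict.get?_insert_of_ne _ _ hk]
    exact hinv k

theorem StInv_sbSet1 (sv : PySem.Dict String (List Char ⊕ String))
    (pv : PySem.Dict String (Int ⊕ String)) (sb : List (String × List Int)) (s : String)
    (v : Int) (hinv : StInv sv pv sb) : StInv sv pv (sbSet1 sb s v) := by
  intro k
  rw [widthOf_sbSet1]
  exact hinv k

theorem startswith_b_of_head (s : String) (c : Char) (tail : List Char)
    (h : s.toList = c :: tail) :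
    PySem.Str.startswith s "b" = (c == 'b') := by
  have hb : ("b" : String).toList = ['b'] := rfl
  rw [PySem.Str.startswith_eq, hb, h]
  cases hc : (c == 'b')
  · apply Bool.eq_false_iff.mpr
    intro htrue
    have hpre := (PySem.Chars.startswith_iff _ _).mp htrue
    rcases List.cons_prefix_cons.mp hpre with ⟨hcb, -⟩
    rw [← hcb] at hc
    simp at hc
  · have hcb : c = 'b' := by simpa using hc
    subst hcb
    exact (PySem.Chars.startswith_iff _ _).mpr
      (List.cons_prefix_cons.mpr ⟨rfl, List.nil_prefix⟩)

set_option maxHeartbeats 1600000 in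
theorem run_equiv : ∀ (lines : List String) (sv : PySem.Dict String (List Char ⊕ String))
    (pv : PySem.Dict String (Int ⊕ String)) (sb : List (String × List Int))
    (seenS : List String),
    StInv sv pv sb → (sb.map Prod.fst).Nodup → preScan sb seenS lines = true →
    (lines.foldl trackStepA (sv, sb)).2 = runAlt pv sb lines := by
  intro lines
  induction lines with
  | nil => intro sv pv sb seenS _ _ _; rfl
  | cons raw rest ih =>
    intro sv pv sb seenS hinv hnd hps
    simp only [List.foldl_cons]
    rcases hline : (PySem.Str.strip raw).toList with _ | ⟨c, tail⟩
    · simp [preScan, hline] at hps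
    · simp only [preScan, hline] at hps
      by_cases hc : c = 'b'
      · -- 'b' line
        have hsw : PySem.Str.startswith (PySem.Str.strip raw) "b" = true := by
          rw [startswith_b_of_head _ _ _ hline, hc]; rfl
        rw [if_pos hc] at hps
        rcases hsp : PySem.Str.split₀ (PySem.Str.strip raw) with _ | ⟨tok, _ | ⟨sid, _ | more⟩⟩ <;>
          simp only [hsp] at hps <;> try exact absurd hps Bool.false_ne_true
        unfold trackStepA runAlt
        simp only [hsw, hsp, if_true]
        rw [Bool.and_eq_true, Bool.and_eq_true] at hps
        obtain ⟨⟨hok, _⟩, hrest⟩ := hps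
        unfold rowOKb at hok
        rw [lookup_eq_sbGet?] at hok
        rcases hrow : sbGet? sb sid with _ | row
        · rw [hrow] at hok
          simp at hok
        rw [hrow] at hok
        simp only [Bool.and_eq_true, decide_eq_true_eq] at hok
        obtain ⟨⟨_, hpos⟩, htokle⟩ := hok
        rw [lookup_eq_sbGet?, hrow]
        simp only [bBranchA, hrow]
        set num_bits : Int := row.getD 0 0 with hnb
        set w : Nat := num_bits.toNat with hw
        have hcastw : num_bits = (w : Int) := by omega
        have hwidth : widthOf sb sid = w := by
          unfold widthOf
          rw [hrow]
          show (max (row.getD 0 0) 0).toNat = w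
          omega
        set bv := PySem.Str.zfill
          (PySem.Str.replace (PySem.Str.replace tok "x" "0") "z" "0") num_bits with hbv
        have hbvlen : bv.toList.length = w := by
          rw [hbv, PySem.Str.toList_zfill, PySem.Chars.length_zfill, replace_xz,
            List.length_map]
          omega
        have hrel := hinv sid
        rcases hA : sv.get? sid with _ | ⟨l | sOld⟩ <;> rw [hA] at hrel <;>
          rcases hB : pv.get? sid with _ | ⟨z | t⟩ <;> rw [hB] at hrel <;>
            simp only [RelV] at hrel <;> (try simp only [hA]) <;> (try simp only [hB]) <;>
            try exact hrel.elim
        · -- first occurrence on both sides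
          apply ih _ _ _ seenS _ hnd hrest
          refine StInv_insert _ _ _ _ _ _ hinv ?_
          rw [hwidth]
          exact ⟨by simp, (maskOf_replicate_zero w).symm⟩
        · -- seen before on both sides: the two counts agree
          obtain ⟨hll, hz⟩ := hrel
          rw [hwidth] at hll
          have htog :
              (PySem.List.pyRange 0 num_bits 1).foldl
                (fun (acc : Int) i =>
                  if PySem.List.pyGetD l i ' ' = '0' ∧ PySem.List.pyGetD bv.toList i ' ' = '1'
                  then acc + 1 else acc) 0
              = (PySem.Int.bitCount (PySem.Int.band z
                  (maskOf (fun c => c = '1') bv.toList)) : Int) := by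
            rw [hcastw, PySem.List.pyRange_zero_natCast w, List.foldl_map]
            simp only [PySem.List.pyGetD_natCast]
            have hstepc := foldl_range_count (fun c => decide (c = '0'))
              (fun c => decide (c = '1')) l bv.toList w (le_of_eq hll.symm)
              (le_of_eq hbvlen.symm)
            simp only [decide_eq_true_eq] at hstepc
            simp only [hstepc]
            rw [List.take_of_length_le (le_of_eq hll),
              List.take_of_length_le (le_of_eq hbvlen), hz]
            rw [core_count (fun x => decide (x = '0')) (fun x => decide (x = '1'))
              l bv.toList (by omega)]
          simp only [htog]
          rw [putCount_eq_sbSet1 _ _ _ hnd]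
          apply ih _ _ _ seenS _ _ _
          · refine StInv_insert _ _ _ _ _ _ (StInv_sbSet1 _ _ _ _ _ hinv) ?_
            rw [widthOf_sbSet1, hwidth]
            exact ⟨hbvlen, rfl⟩
          · rw [keys_sbSet1]; exact hnd
          · rw [preScan_sbSet1]; exact hrest
        · -- id previously used single-bit: both ports keep the state (outside Pre_)
          exact ih _ _ _ seenS hinv hnd hrest
      · -- non-'b' line
        have hsw : PySem.Str.startswith (PySem.Str.strip raw) "b" = false := by
          rw [startswith_b_of_head _ _ _ hline]
          simpa using hc
        rw [if_neg hc] at hps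
        unfold trackStepA runAlt
        simp only [hsw, Bool.false_eq_true, if_false, hline]

        by_cases h01 : c = '0' ∨ c = '1' ∨ c = 'x' ∨ c = 'z'
        · rw [if_pos h01] at hps
          simp only [Bool.and_eq_true] at hps
          obtain ⟨_, hrest⟩ := hps
          simp only [singleBranchA, if_pos h01]
          set bit : String := if c = 'x' ∨ c = 'z' then "0" else String.ofList [c] with hbit
          set sid := String.ofList tail with hsid
          have hrel := hinv sid
          rcases hA : sv.get? sid with _ | ⟨l | sOld⟩ <;> rw [hA] at hrel <;>
            rcases hB : pv.get? sid with _ | ⟨z | t⟩ <;> rw [hB] at hrel <;>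
              simp only [RelV] at hrel <;> (try simp only [hA]) <;> (try simp only [hB]) <;>
              try exact hrel.elim
          · -- first occurrence on both sides
            have hng : ¬((none : Option (Int ⊕ String)) = some (Sum.inr "0") ∧ bit = "1") := by
              rintro ⟨h, -⟩; cases h
            rw [if_neg hng]
            exact ih _ _ _ (sid :: seenS) (StInv_insert _ _ _ _ _ _ hinv rfl) hnd hrest
          · -- previously multi-bit on both sides: neither updates signal_bits
            have hga : ¬((Sum.inl l : List Char ⊕ String) = Sum.inr "0" ∧ bit = "1") := by
              rintro ⟨h, -⟩; cases h
            have hgb : ¬(some (Sum.inl z) = some (Sum.inr ("0" : String) : Int ⊕ String) ∧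
                bit = "1") := by
              rintro ⟨h, -⟩; cases h
            rw [if_neg hga, if_neg hgb]
            exact ih _ _ _ (sid :: seenS) (StInv_insert _ _ _ _ _ _ hinv rfl) hnd hrest
          · -- previously single-bit on both sides, with equal stored values
            subst hrel
            have hguards : ((Sum.inr sOld : List Char ⊕ String) = Sum.inr "0" ∧ bit = "1")
                ↔ (some (Sum.inr sOld) = some (Sum.inr ("0" : String) : Int ⊕ String) ∧
                   bit = "1") := by
              constructor
              · rintro ⟨h, h2⟩; cases h; exact ⟨rfl, h2⟩
              · rintro ⟨h, h2⟩; cases h; exact ⟨rfl, h2⟩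
            by_cases hg : (Sum.inr sOld : List Char ⊕ String) = Sum.inr "0" ∧ bit = "1"
            · rw [if_pos hg, if_pos (hguards.mp hg), putCount_eq_sbSet1 _ _ _ hnd]
              refine ih _ _ _ (sid :: seenS) ?_ ?_ ?_
              · exact StInv_insert _ _ _ _ _ _ (StInv_sbSet1 _ _ _ _ _ hinv) rfl
              · rw [keys_sbSet1]; exact hnd
              · rw [preScan_sbSet1]; exact hrest
            · rw [if_neg hg, if_neg ((not_congr hguards).mp hg)]
              exact ih _ _ _ (sid :: seenS) (StInv_insert _ _ _ _ _ _ hinv rfl) hnd hrest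
        · rw [if_neg h01] at hps
          simp only [singleBranchA, if_neg h01]
          exact ih _ _ _ seenS hinv hnd hps

-- ===== VERDICT (by name: the statement is the Claim_ definition above) =====
theorem track_toggles_spec : Claim_equal_track_toggles := by
  intro vcd_lines signal_bits _ hpre
  unfold Spec_track_toggles track_toggles track_toggles_alt
  exact run_equiv vcd_lines PySem.Dict.empty PySem.Dict.empty signal_bits []
    (fun k => by simp [PySem.Dict.get?_empty, RelV]) hpre.1 hpre.2
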